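-- pv_equiv track=rewrite | github.com/japcio/python | kropek-v4.1.py | declare_empty_table
-- ===== SOURCE A (Python) =====
-- def declare_empty_table(board_size):
--     snake_board=[]
--     for i in range (0,board_size):
--        snake_board.append([])
--        for j in range(0, board_size):
--            snake_board[i].append(" ")
--
--     #write border in table
--     for i in range(0,board_size):
--         snake_board[0][i]='\033[36m_\033[39m'
--         snake_board[board_size-1][i]='\033[36m-\033[39m'
--     for i in range (1,board_size-1):
--         snake_board[i][0]='\033[36m|\033[39m'
--         snake_board[i][board_size-1]='\033[36m|\033[39m'
--     return snake_board
-- ===== SOURCE B (Python) =====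
-- def declare_empty_table(board_size):
--     n = board_size
--     mid = ['\033[36m|\033[39m'] + [' '] * (n - 2) + ['\033[36m|\033[39m']
--     return [['\033[36m-\033[39m'] * n if i == n - 1 else
--             ['\033[36m_\033[39m'] * n if i == 0 else
--             list(mid)
--             for i in range(n)]
-- ===== Notes on version B (the rewrite author's own statement) =====
-- stated objective: simpler
-- what changed: A builds the board by three mutation passes (fill with spaces, overwrite top/bottom rows, overwrite side columns); B computes each cell directly from its position (i, j) in one nested comprehension with no overwriting.
import Mathlib
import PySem

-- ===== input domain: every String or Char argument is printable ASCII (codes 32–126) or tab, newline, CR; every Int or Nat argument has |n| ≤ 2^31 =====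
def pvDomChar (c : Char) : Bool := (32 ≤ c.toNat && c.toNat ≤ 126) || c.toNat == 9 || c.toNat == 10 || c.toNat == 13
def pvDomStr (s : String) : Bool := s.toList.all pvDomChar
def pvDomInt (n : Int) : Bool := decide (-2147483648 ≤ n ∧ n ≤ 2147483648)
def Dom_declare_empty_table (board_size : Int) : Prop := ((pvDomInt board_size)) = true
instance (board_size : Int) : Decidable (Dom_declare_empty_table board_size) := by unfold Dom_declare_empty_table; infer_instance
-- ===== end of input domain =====

-- B replaces A's three mutation passes (fill, horizontal border, vertical border) by one
-- positional pass computing each cell from (i, j); objective: simpler.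

def pvU : String := "\u001B[36m_\u001B[39m"
def pvD : String := "\u001B[36m-\u001B[39m"
def pvB : String := "\u001B[36m|\u001B[39m"

-- ===== PORT A =====
-- All indices used below (0, i from the ranges, board_size-1 when a loop body runs) are
-- non-negative and in range, so `.toNat` together with List.modify/List.set is exact here.
def declare_empty_table (board_size : Int) : List (List String) :=
  -- fill loop: each outer step appends a fresh row, then appends " " board_size times to it
  let b0 : List (List String) :=
    (PySem.List.pyRange 0 board_size 1).foldl
      (fun b _i =>
        b ++ [(PySem.List.pyRange 0 board_size 1).foldl (fun row _j => row ++ [" "]) []]) []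
  -- horizontal borders: snake_board[0][i] = '_' ; snake_board[board_size-1][i] = '-'
  let b1 : List (List String) :=
    (PySem.List.pyRange 0 board_size 1).foldl
      (fun b i =>
        (b.modify 0 (fun r => r.set i.toNat pvU)).modify
          (board_size - 1).toNat (fun r => r.set i.toNat pvD)) b0
  -- vertical borders: snake_board[i][0] = snake_board[i][board_size-1] = '|'
  (PySem.List.pyRange 1 (board_size - 1) 1).foldl
    (fun b i => b.modify i.toNat (fun r => (r.set 0 pvB).set (board_size - 1).toNat pvB)) b1

-- ===== PORT B =====
-- `['x'] * k` with a possibly negative k is an empty list in Python; `.toNat` clamps the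
-- same way, so List.replicate (k).toNat is exact here.
def declare_empty_table_alt (board_size : Int) : List (List String) :=
  let mid : List String := [pvB] ++ List.replicate (board_size - 2).toNat " " ++ [pvB]
  (PySem.List.pyRange 0 board_size 1).map (fun i =>
    if i == board_size - 1 then List.replicate board_size.toNat pvD
    else if i == 0 then List.replicate board_size.toNat pvU
    else mid)

-- ===== PRECONDITION & SPEC =====
def Spec_declare_empty_table (board_size : Int) (out : List (List String)) : Prop := out = declare_empty_table_alt board_size
instance (board_size : Int) (out : List (List String)) : Decidable (Spec_declare_empty_table board_size out) := by unfold Spec_declare_empty_table; infer_instance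

-- ===== CLAIM (what is proved, stated in full; the proofs are below) =====
def Claim_equal_declare_empty_table : Prop := ∀ (board_size : Int), Dom_declare_empty_table board_size → Spec_declare_empty_table board_size (declare_empty_table board_size)

-- ===== LEMMAS AND PROOFS =====

-- appending a constant element once per iteration is appending a replicate
theorem pv_foldl_app {α β : Type} (l : List α) (b : List β) (x : β) :
    l.foldl (fun acc _ => acc ++ [x]) b = b ++ List.replicate l.length x := by
  induction l generalizing b with
  | nil => simp
  | cons a t ih => simp [ih, List.replicate_succ]

theorem pv_modify_map_range {α : Type} (N p : Nat) (f : Nat → α) (g : α → α) (_hp : p < N) :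
    ((List.range N).map f).modify p g
      = (List.range N).map (fun k => if k = p then g (f p) else f k) := by
  apply List.ext_getElem
  · simp
  · intro j h1 h2
    rw [List.getElem_modify]
    by_cases h : p = j
    · subst h
      simp
    · rw [if_neg h]
      simp only [List.getElem_map, List.getElem_range]
      rw [if_neg (fun hh => h hh.symm)]

theorem pv_set_repl {α : Type} (m N : Nat) (h : m < N) (c d : α) :
    (List.replicate m c ++ List.replicate (N - m) d).set m c
      = List.replicate (m + 1) c ++ List.replicate (N - (m + 1)) d := by
  apply List.ext_getElem
  · simp; omega
  · intro j h1 h2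
    simp only [List.getElem_set, List.getElem_append, List.getElem_replicate,
      List.length_replicate] at *
    split_ifs <;> first | (simp_all; done) | (simp_all; omega)

theorem pv_stage2 (N : Nat) (hN : 2 ≤ N) : ∀ m, m ≤ N →
    (List.range m).foldl
      (fun b k => (b.modify 0 (fun r => r.set k pvU)).modify (N - 1) (fun r => r.set k pvD))
      (List.replicate N (List.replicate N " "))
    = (List.range N).map (fun p =>
        if p = 0 then List.replicate m pvU ++ List.replicate (N - m) " "
        else if p = N - 1 then List.replicate m pvD ++ List.replicate (N - m) " "
        else List.replicate N " ") := by
  intro m hm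
  induction m with
  | zero =>
    simp
  | succ m ih =>
    rw [List.range_succ, List.foldl_append, ih (by omega)]
    simp only [List.foldl_cons, List.foldl_nil]
    rw [pv_modify_map_range N 0 _ _ (by omega)]
    rw [pv_modify_map_range N (N - 1) _ _ (by omega)]
    apply List.map_congr_left
    intro k hk
    simp only [List.mem_range] at hk
    split_ifs <;>
      first
        | rfl
        | (exfalso; omega)
        | rw [pv_set_repl m N (by omega)]

theorem pv_stage3 (N : Nat) (hN : 2 ≤ N) : ∀ m, m ≤ N - 2 →
    (List.range m).foldl
      (fun b k => b.modify (k + 1) (fun r => (r.set 0 pvB).set (N - 1) pvB))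
      ((List.range N).map (fun p =>
        if p = 0 then List.replicate N pvU
        else if p = N - 1 then List.replicate N pvD
        else List.replicate N " "))
    = (List.range N).map (fun p =>
        if p = 0 then List.replicate N pvU
        else if p = N - 1 then List.replicate N pvD
        else if 1 ≤ p ∧ p ≤ m then ((List.replicate N (" " : String)).set 0 pvB).set (N - 1) pvB
        else List.replicate N " ") := by
  intro m hm
  induction m with
  | zero =>
    apply List.map_congr_left
    intro k hk
    split_ifs <;>
      first
        | rfl
        | (exfalso; omega)
  | succ m ih =>
    rw [List.range_succ, List.foldl_append, ih (by omega)]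
    simp only [List.foldl_cons, List.foldl_nil]
    rw [pv_modify_map_range N (m + 1) _ _ (by omega)]
    apply List.map_congr_left
    intro k hk
    simp only [List.mem_range] at hk
    split_ifs <;>
      first
        | rfl
        | (exfalso; omega)

-- B's middle row equals a blank row with its two ends overwritten
theorem pv_mid_row (N : Nat) (hN : 2 ≤ N) :
    [pvB] ++ List.replicate (N - 2) (" " : String) ++ [pvB]
      = ((List.replicate N (" " : String)).set 0 pvB).set (N - 1) pvB := by
  apply List.ext_getElem
  · simp; omega
  · intro j h1 h2
    simp only [List.length_append, List.length_cons, List.length_nil, List.length_replicate,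
      List.getElem_set, List.getElem_append, List.getElem_replicate,
      List.getElem_cons] at *
    split_ifs <;> first | rfl | (exfalso; omega) | (simp_all; done) | (simp_all; omega)

-- B on casts: declare_empty_table_alt ↑N as a map over List.range with Nat-level conditions
theorem pv_alt_eq (N : Nat) (hN : 2 ≤ N) :
    declare_empty_table_alt (N : Int)
      = (List.range N).map (fun p =>
          if p = 0 then List.replicate N pvU
          else if p = N - 1 then List.replicate N pvD
          else if 1 ≤ p ∧ p ≤ N - 2 then ((List.replicate N (" " : String)).set 0 pvB).set (N - 1) pvB
          else List.replicate N " ") := by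
  unfold declare_empty_table_alt
  rw [PySem.List.pyRange_one]
  have ht : ((N : Int) - 0).toNat = N := by omega
  have ht2 : ((N : Int) - 2).toNat = N - 2 := by omega
  have htN : ((N : Int)).toNat = N := by omega
  simp only [ht, ht2, htN, zero_add, List.map_map, Function.comp_def]
  apply List.map_congr_left
  intro k hk
  simp only [List.mem_range] at hk
  by_cases hk1 : k = N - 1
  · subst hk1
    have hb : (((N - 1 : Nat) : Int) == (N : Int) - 1) = true := by
      simp only [beq_iff_eq]; omega
    have h0 : (N : Nat) - 1 ≠ 0 := by omega
    rw [hb, if_pos rfl, if_neg h0, if_pos rfl]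
  · by_cases hk0 : k = 0
    · subst hk0
      have hb1 : (((0 : Nat) : Int) == (N : Int) - 1) = false := by
        simp only [beq_eq_false_iff_ne]; omega
      have hb2 : (((0 : Nat) : Int) == (0 : Int)) = true := by
        simp only [beq_iff_eq]; omega
      rw [hb1, hb2]
      simp only [Bool.false_eq_true, if_false, if_true]
    · have hb1 : (((k : Nat) : Int) == (N : Int) - 1) = false := by
        simp only [beq_eq_false_iff_ne]; omega
      have hb2 : (((k : Nat) : Int) == (0 : Int)) = false := by
        simp only [beq_eq_false_iff_ne]; omega
      rw [hb1, hb2]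
      simp only [Bool.false_eq_true, if_false]
      rw [if_neg hk0, if_neg hk1, if_pos (by omega : 1 ≤ k ∧ k ≤ N - 2), ← pv_mid_row N hN]

-- A on casts: the three passes of the port, composed, for N ≥ 2
theorem pv_A_eq (N : Nat) (hN : 2 ≤ N) :
    declare_empty_table (N : Int)
      = (List.range N).map (fun p =>
          if p = 0 then List.replicate N pvU
          else if p = N - 1 then List.replicate N pvD
          else if 1 ≤ p ∧ p ≤ N - 2 then ((List.replicate N (" " : String)).set 0 pvB).set (N - 1) pvB
          else List.replicate N " ") := by
  unfold declare_empty_table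
  have ht : ((N : Int) - 0).toNat = N := by omega
  have ht1 : ((N : Int) - 1).toNat = N - 1 := by omega
  have ht2 : ((N : Int) - 1 - 1).toNat = N - 2 := by omega
  have hadd : ∀ k : Nat, ((1 : Int) + (k : Int)).toNat = k + 1 := by intro k; omega
  simp only [PySem.List.pyRange_one, ht, ht1, ht2, zero_add, List.foldl_map,
    Int.toNat_natCast, hadd]
  simp only [pv_foldl_app, List.length_range, List.nil_append]
  rw [pv_stage2 N hN N le_rfl]
  simp only [Nat.sub_self, List.replicate_zero, List.append_nil]
  rw [pv_stage3 N hN (N - 2) le_rfl]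

-- ===== VERDICT (by name: the statement is the Claim_ definition above) =====
theorem declare_empty_table_spec : Claim_equal_declare_empty_table := by
  intro n _
  unfold Spec_declare_empty_table
  rcases lt_trichotomy n 1 with h | h | h
  · -- n ≤ 0: every loop is empty on both sides
    unfold declare_empty_table declare_empty_table_alt
    rw [PySem.List.pyRange_one_eq_nil (by omega : n ≤ 0),
      PySem.List.pyRange_one_eq_nil (by omega : n - 1 ≤ 1)]
    simp
  · subst h
    unfold declare_empty_table declare_empty_table_alt
    have h01 : PySem.List.pyRange 0 1 1 = [0] := by
      simpa using PySem.List.pyRange_one_singleton (a := (0 : Int))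
    have hnil : PySem.List.pyRange 1 (1 - 1) 1 = [] := PySem.List.pyRange_one_eq_nil (by omega)
    simp only [h01, hnil]
    simp
  · obtain ⟨N, rfl⟩ : ∃ N : Nat, n = (N : Int) := ⟨n.toNat, by omega⟩
    have hN : 2 ≤ N := by exact_mod_cast h
    rw [pv_A_eq N hN, pv_alt_eq N hN]
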